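-- pv_equiv track=rewrite | github.com/aayush78-byte/ailegalproject | backend/rule_engine.py | calculate_risk_level
-- ===== SOURCE A (Python) =====
-- from typing import Dict, List, Optional
--
-- def calculate_risk_level(violations: List[Dict]) -> str:
--     """
--     Calculate overall risk level based on violations
--
--     Args:
--         violations: List of violation dicts
--
--     Returns:
--         Risk level string: critical, high, medium, low
--     """
--     if not violations:
--         return "low"
--
--     # Calculate max severity score
--     severity_map = {
--         "critical": 100,
--         "high": 75,
--         "medium": 50,
--         "low": 25
--     }
--
--     max_severity = 0
--     for violation in violations:
--         severity = violation.get('severity', 'low')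
--         score = severity_map.get(severity, 0)
--         max_severity = max(max_severity, score)
--
--     # Map to risk level
--     if max_severity >= 85:
--         return "critical"
--     elif max_severity >= 60:
--         return "high"
--     elif max_severity >= 30:
--         return "medium"
--     else:
--         return "low"
-- ===== SOURCE B (Python) =====
-- from typing import Dict, List, Optional
--
-- def calculate_risk_level(violations: List[Dict]) -> str:
--     severities = {v.get('severity', 'low') for v in violations}
--     for level in ("critical", "high", "medium", "low"):
--         if level in severities:
--             return level
--     return "low"
-- ===== Notes on version B (the rewrite author's own statement) =====
-- stated objective: idiomatic
-- what changed: Replaced the numeric severity_map, running-max accumulation and threshold ladder by a presence set of severity strings scanned against a fixed priority order.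
import Mathlib
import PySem

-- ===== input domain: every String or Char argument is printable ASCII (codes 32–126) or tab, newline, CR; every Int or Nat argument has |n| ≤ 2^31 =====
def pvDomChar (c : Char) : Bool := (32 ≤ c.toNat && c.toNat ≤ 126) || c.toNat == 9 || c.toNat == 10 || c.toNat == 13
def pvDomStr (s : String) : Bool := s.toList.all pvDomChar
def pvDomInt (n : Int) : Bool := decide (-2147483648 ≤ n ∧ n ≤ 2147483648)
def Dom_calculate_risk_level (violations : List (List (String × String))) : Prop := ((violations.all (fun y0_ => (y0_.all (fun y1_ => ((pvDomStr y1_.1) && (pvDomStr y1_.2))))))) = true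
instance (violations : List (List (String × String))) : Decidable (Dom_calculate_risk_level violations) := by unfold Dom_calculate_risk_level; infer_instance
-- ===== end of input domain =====

-- B replaces the numeric severity map and running-max loop by a presence set of
-- severity strings scanned against a fixed priority order (idiomatic, same cost).


-- ===== PORT A =====
-- violation.get('severity', 'low')
def pvSeverity (violation : List (String × String)) : String :=
  PySem.Dict.getD (PySem.Dict.mk violation) "severity" "low"

def calculate_risk_level (violations : List (List (String × String))) : String :=
  if violations = [] then "low"
  else
    let severity_map : PySem.Dict String Int :=
      PySem.Dict.ofList [("critical", 100), ("high", 75), ("medium", 50), ("low", 25)]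
    let max_severity : Int :=
      violations.foldl
        (fun max_severity violation =>
          max max_severity (PySem.Dict.getD severity_map (pvSeverity violation) 0)) 0
    if max_severity ≥ 85 then "critical"
    else if max_severity ≥ 60 then "high"
    else if max_severity ≥ 30 then "medium"
    else "low"

-- ===== PORT B =====
def calculate_risk_level_alt (violations : List (List (String × String))) : String :=
  let severities : PySem.Set String :=
    PySem.Set.ofList (violations.map pvSeverity)
  match ["critical", "high", "medium", "low"].find? (fun level => PySem.Set.contains severities level) with
  | some level => level
  | none => "low"

-- ===== PRECONDITION & SPEC =====
def Spec_calculate_risk_level (violations : List (List (String × String))) (out : String) : Prop := out = calculate_risk_level_alt violations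
instance (violations : List (List (String × String))) (out : String) : Decidable (Spec_calculate_risk_level violations out) := by unfold Spec_calculate_risk_level; infer_instance

-- ===== CLAIM (what is proved, stated in full; the proofs are below) =====
def Claim_equal_calculate_risk_level : Prop := ∀ (violations : List (List (String × String))), Dom_calculate_risk_level violations → Spec_calculate_risk_level violations (calculate_risk_level violations)

-- ===== LEMMAS AND PROOFS =====

-- the score assigned to a severity string by A's severity_map lookup
def pvScore (s : String) : Int :=
  PySem.Dict.getD (PySem.Dict.ofList [("critical", 100), ("high", 75), ("medium", 50), ("low", 25)]) s 0

theorem pvScore_eq (s : String) :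
    pvScore s = if s = "critical" then 100 else if s = "high" then 75
      else if s = "medium" then 50 else if s = "low" then 25 else 0 := by
  by_cases h1 : s = "critical"
  · subst h1; decide
  by_cases h2 : s = "high"
  · subst h2; decide
  by_cases h3 : s = "medium"
  · subst h3; decide
  by_cases h4 : s = "low"
  · subst h4; decide
  rw [if_neg h1, if_neg h2, if_neg h3, if_neg h4]
  have h : PySem.Dict.ofList [("critical", (100:Int)), ("high", 75), ("medium", 50), ("low", 25)]
      = PySem.Dict.mk [("critical", 100), ("high", 75), ("medium", 50), ("low", 25)] := by decide
  rw [pvScore, h]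
  simp only [PySem.Dict.getD, PySem.Dict.get?_mk_cons, beq_iff_eq]
  rw [if_neg (fun hx : "critical" = s => h1 hx.symm), if_neg (fun hx : "high" = s => h2 hx.symm),
    if_neg (fun hx : "medium" = s => h3 hx.symm), if_neg (fun hx : "low" = s => h4 hx.symm)]
  rfl

theorem foldl_max_ge (ss : List String) (a k : Int) :
    k ≤ ss.foldl (fun m s => max m (pvScore s)) a ↔ k ≤ a ∨ ∃ s ∈ ss, k ≤ pvScore s := by
  induction ss generalizing a with
  | nil => simp
  | cons x xs ih =>
      simp only [List.foldl_cons, ih, le_max_iff, List.mem_cons]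
      constructor
      · rintro ((h | h) | ⟨s, hs, h⟩)
        · exact Or.inl h
        · exact Or.inr ⟨x, Or.inl rfl, h⟩
        · exact Or.inr ⟨s, Or.inr hs, h⟩
      · rintro (h | ⟨s, (rfl | hs), h⟩)
        · exact Or.inl (Or.inl h)
        · exact Or.inl (Or.inr h)
        · exact Or.inr ⟨s, hs, h⟩

-- ===== VERDICT (by name: the statement is the Claim_ definition above) =====
theorem calculate_risk_level_spec : Claim_equal_calculate_risk_level := by
  intro violations _
  show calculate_risk_level violations = calculate_risk_level_alt violations
  unfold calculate_risk_level calculate_risk_level_alt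
  by_cases hnil : violations = []
  · simp [hnil, PySem.Set.ofList, List.find?]
  simp only [if_neg hnil]
  have hfold :
      violations.foldl
        (fun m v => max m (PySem.Dict.getD
          (PySem.Dict.ofList [("critical", 100), ("high", 75), ("medium", 50), ("low", 25)])
          (pvSeverity v) 0)) 0
      = (violations.map pvSeverity).foldl (fun m s => max m (pvScore s)) 0 := by
    rw [List.foldl_map]; rfl
  rw [hfold]
  set ss := violations.map pvSeverity with hss
  by_cases hc : "critical" ∈ ss
  · have h85 : (85 : Int) ≤ ss.foldl (fun m s => max m (pvScore s)) 0 := by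
      rw [foldl_max_ge]; exact Or.inr ⟨_, hc, by rw [pvScore_eq]; simp⟩
    simp [List.find?, hc, h85]
  by_cases hh : "high" ∈ ss
  · have h60 : (60 : Int) ≤ ss.foldl (fun m s => max m (pvScore s)) 0 := by
      rw [foldl_max_ge]; exact Or.inr ⟨_, hh, by rw [pvScore_eq]; simp⟩
    have h85 : ¬ (85 : Int) ≤ ss.foldl (fun m s => max m (pvScore s)) 0 := by
      rw [foldl_max_ge]
      rintro (h | ⟨s, hs, h⟩)
      · omega
      · rw [pvScore_eq] at h
        split_ifs at h with h1 <;> first | (exact hc (h1 ▸ hs)) | omega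
    simp [List.find?, hc, hh, h85, h60]
  by_cases hm : "medium" ∈ ss
  · have h30 : (30 : Int) ≤ ss.foldl (fun m s => max m (pvScore s)) 0 := by
      rw [foldl_max_ge]; exact Or.inr ⟨_, hm, by rw [pvScore_eq]; simp⟩
    have h60 : ¬ (60 : Int) ≤ ss.foldl (fun m s => max m (pvScore s)) 0 := by
      rw [foldl_max_ge]
      rintro (h | ⟨s, hs, h⟩)
      · omega
      · rw [pvScore_eq] at h
        split_ifs at h with h1 h2 <;>
          first | (exact hc (h1 ▸ hs)) | (exact hh (h2 ▸ hs)) | omega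
    have h85 : ¬ (85 : Int) ≤ ss.foldl (fun m s => max m (pvScore s)) 0 := by
      intro h; exact h60 (by omega)
    simp [List.find?, hc, hh, hm, h85, h60, h30]
  · have h30 : ¬ (30 : Int) ≤ ss.foldl (fun m s => max m (pvScore s)) 0 := by
      rw [foldl_max_ge]
      rintro (h | ⟨s, hs, h⟩)
      · omega
      · rw [pvScore_eq] at h
        split_ifs at h with h1 h2 h3 <;>
          first | (exact hc (h1 ▸ hs)) | (exact hh (h2 ▸ hs)) | (exact hm (h3 ▸ hs)) | omega
    have h60 : ¬ (60 : Int) ≤ ss.foldl (fun m s => max m (pvScore s)) 0 := fun h => h30 (by omega)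
    have h85 : ¬ (85 : Int) ≤ ss.foldl (fun m s => max m (pvScore s)) 0 := fun h => h30 (by omega)
    by_cases hl : "low" ∈ ss
    · simp [List.find?, hc, hh, hm, hl, h85, h60, h30]
    · simp [List.find?, hc, hh, hm, hl, h85, h60, h30]
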